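-- pv_equiv track=rewrite | github.com/TimeFliessss/trash | bilibili/bili_login.py | _render_half_block
-- ===== SOURCE A (Python) =====
-- def _render_half_block(matrix) -> str:
--     lines = []
--     height = len(matrix)
--     width = len(matrix[0]) if height else 0
--     for y in range(0, height, 2):
--         upper = matrix[y]
--         lower = matrix[y + 1] if y + 1 < height else [False] * width
--         row = []
--         for u, l in zip(upper, lower):
--             if u and l:
--                 row.append("\u2588")
--             elif u and not l:
--                 row.append("\u2580")
--             elif (not u) and l:
--                 row.append("\u2584")
--             else:
--                 row.append(" ")
--         lines.append("".join(row))
--     return "\n".join(lines)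
-- ===== SOURCE B (Python) =====
-- def _render_half_block(matrix) -> str:
--     # Staged two-pass overlay: render upper halves and lower halves separately,
--     # then merge the two string layers character-by-character via a lookup dict.
--     MERGE = {(" ", " "): " ", (" ", "\u2584"): "\u2584",
--              ("\u2580", " "): "\u2580", ("\u2580", "\u2584"): "\u2588"}
--     width = len(matrix[0]) if matrix else 0
--     tops = ["".join("\u2580" if c else " " for c in row) for row in matrix[0::2]]
--     bots = ["".join("\u2584" if c else " " for c in row) for row in matrix[1::2]]
--     if len(bots) < len(tops):
--         bots.append(" " * width)
--     return "\n".join("".join(MERGE[t, b] for t, b in zip(top, bot))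
--                      for top, bot in zip(tops, bots))
-- ===== Notes on version B (the rewrite author's own statement) =====
-- stated objective: alternative
-- what changed: Instead of one pass pairing rows two at a time with a four-way per-cell branch, B renders two separate layers in staged passes (upper-half glyphs from matrix[0::2], lower-half glyphs from matrix[1::2], one pad row if the height is odd) and then overlays the two string layers character-by-character through a merge dictionary.
import Mathlib
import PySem

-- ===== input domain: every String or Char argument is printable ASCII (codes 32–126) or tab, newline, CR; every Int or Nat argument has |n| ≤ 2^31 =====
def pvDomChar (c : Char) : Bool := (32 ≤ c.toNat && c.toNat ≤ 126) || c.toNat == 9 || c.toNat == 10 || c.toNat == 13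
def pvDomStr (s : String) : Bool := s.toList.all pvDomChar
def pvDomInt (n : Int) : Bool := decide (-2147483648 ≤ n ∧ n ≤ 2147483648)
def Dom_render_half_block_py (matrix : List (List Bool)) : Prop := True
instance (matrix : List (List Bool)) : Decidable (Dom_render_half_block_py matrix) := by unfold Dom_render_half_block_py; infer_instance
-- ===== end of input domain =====

-- B replaces A's single pass (pairing rows two at a time with a four-way per-cell branch)
-- by staged passes: an upper-glyph layer from matrix[0::2], a lower-glyph layer from
-- matrix[1::2] plus one pad row, overlaid character-by-character via a merge dict (alternative).

-- ===== PORT A =====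
-- inner loop of A: row built by appending one glyph per zipped cell, then "".join(row)
def pvRowA (upper lower : List Bool) : String :=
  String.mk ((upper.zip lower).foldl (fun row p =>
    row ++ [if p.1 && p.2 then '█'
            else if p.1 && !p.2 then '▀'
            else if !p.1 && p.2 then '▄'
            else ' ']) [])

def render_half_block_py (matrix : List (List Bool)) : String :=
  let height : Int := matrix.length
  let width : Nat := if height ≠ 0 then (PySem.List.pyGetD matrix 0 []).length else 0
  let lines := (PySem.List.pyRange 0 height 2).foldl (fun lines y =>
    let upper := PySem.List.pyGetD matrix y []
    let lower := if y + 1 < height then PySem.List.pyGetD matrix (y + 1) []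
                 else List.replicate width false
    lines ++ [pvRowA upper lower]) ([] : List String)
  String.intercalate "\n" lines

-- ===== PORT B =====
-- the MERGE dict literal of Source B (insertion-order association list)
def pvMerge : PySem.Dict (Char × Char) Char :=
  PySem.Dict.ofList [((' ', ' '), ' '), ((' ', '▄'), '▄'), (('▀', ' '), '▀'), (('▀', '▄'), '█')]

-- "".join('▀' if c else ' ' for c in row)  /  '▄' variant
def pvTopRow (row : List Bool) : List Char := row.map (fun c => if c then '▀' else ' ')
def pvBotRow (row : List Bool) : List Char := row.map (fun c => if c then '▄' else ' ')

-- "".join(MERGE[t, b] for t, b in zip(top, bot)); the key is always present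
-- (layer chars are only ' '/'▀' and ' '/'▄'), so the .getD default is unreachable
def pvOverlay (top bot : List Char) : String :=
  String.mk ((top.zip bot).map (fun q => (PySem.Dict.get? pvMerge q).getD ' '))

def render_half_block_py_alt (matrix : List (List Bool)) : String :=
  let width : Nat := if matrix ≠ [] then (matrix.headD []).length else 0
  let tops := ((PySem.List.slice? matrix (some 0) none 2).getD []).map pvTopRow
  let bots0 := ((PySem.List.slice? matrix (some 1) none 2).getD []).map pvBotRow
  let bots := if bots0.length < tops.length then bots0 ++ [List.replicate width ' '] else bots0
  String.intercalate "\n" ((tops.zip bots).map (fun p => pvOverlay p.1 p.2))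

-- ===== PRECONDITION & SPEC =====
def Spec_render_half_block_py (matrix : List (List Bool)) (out : String) : Prop := out = render_half_block_py_alt matrix
instance (matrix : List (List Bool)) (out : String) : Decidable (Spec_render_half_block_py matrix out) := by unfold Spec_render_half_block_py; infer_instance

-- ===== CLAIM (what is proved, stated in full; the proofs are below) =====
def Claim_equal_render_half_block_py : Prop := ∀ (matrix : List (List Bool)), Dom_render_half_block_py matrix → Spec_render_half_block_py matrix (render_half_block_py matrix)

-- ===== LEMMAS AND PROOFS =====

-- the row pairs both programs ultimately render: (upper, lower) two rows at a time,
-- the lower of an odd last row being the pad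
def pvPairs : List (List Bool) → List Bool → List (List Bool × List Bool)
  | [], _ => []
  | [u], pad => [(u, pad)]
  | u :: l :: t, pad => (u, l) :: pvPairs t pad

-- matrix[0::2] / matrix[1::2] as structural recursions
def pvEvens : List (List Bool) → List (List Bool)
  | [] => []
  | [u] => [u]
  | u :: _ :: t => u :: pvEvens t

def pvOdds : List (List Bool) → List (List Bool)
  | [] => []
  | [_] => []
  | _ :: l :: t => l :: pvOdds t

theorem pvFlatMap_single {α β : Type} (f : α → β) (l : List α) :
    List.flatMap (fun x => [f x]) l = l.map f := by
  induction l with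
  | nil => rfl
  | cons a t ih => simp [List.flatMap_cons, ih]

theorem pvGetD_cons_zero (a : List Bool) (xs : List (List Bool)) :
    PySem.List.pyGetD (a :: xs) 0 [] = a := by
  rw [PySem.List.pyGetD_of_nonneg _ _ le_rfl]
  rfl

theorem pvGetD_cons_shift (a : List Bool) (xs : List (List Bool)) (y : Int) (hy : 0 ≤ y) :
    PySem.List.pyGetD (a :: xs) (y + 1) [] = PySem.List.pyGetD xs y [] := by
  rw [PySem.List.pyGetD_of_nonneg _ _ (by omega), PySem.List.pyGetD_of_nonneg _ _ hy]
  have h : (y + 1).toNat = y.toNat + 1 := by omega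
  rw [h, List.getD_cons_succ]

-- a step-2 range over [0, n+2) peels off 0 and shifts the rest by 2
theorem pvRange_two_step (n : Int) (hn : 0 ≤ n) :
    PySem.List.pyRange 0 (n + 2) 2 = 0 :: (PySem.List.pyRange 0 n 2).map (· + 2) := by
  rw [PySem.List.pyRange_of_pos 0 (n + 2) (by norm_num),
      PySem.List.pyRange_of_pos 0 n (by norm_num)]
  have h2 : (if (0:Int) < n + 2 then ((n + 2 - 0 + 2 - 1) / 2).toNat else 0)
      = (if (0:Int) < n then ((n - 0 + 2 - 1) / 2).toNat else 0) + 1 := by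
    split_ifs <;> omega
  rw [h2, List.range_succ_eq_map, List.map_cons, List.map_map, List.map_map]
  have hhead : (0 : Int) + 2 * ((0 : Nat) : Int) = 0 := by norm_num
  rw [hhead]
  congr 1

-- A's mapped range of pair-rows equals the pair list
theorem pvLinesA_eq (m : List (List Bool)) (w : Nat) :
    (PySem.List.pyRange 0 (m.length : Int) 2).map (fun y =>
      pvRowA (PySem.List.pyGetD m y [])
        (if y + 1 < (m.length : Int) then PySem.List.pyGetD m (y + 1) []
         else List.replicate w false))
    = (pvPairs m (List.replicate w false)).map (fun p => pvRowA p.1 p.2) := by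
  induction m, (List.replicate w false) using pvPairs.induct with
  | case1 => simp [PySem.List.pyRange, pvPairs]
  | case2 u =>
    have h1 : ((([u] : List (List Bool)).length : Int)) = 1 := by simp
    rw [h1]
    have h2 : PySem.List.pyRange 0 1 2 = [0] := by decide
    rw [h2]
    simp [pvPairs, PySem.List.pyGetD, PySem.List.pyGet?, PySem.List.pyIdx?]
  | case3 u l t pad ih =>
    have h1 : (((u :: l :: t).length : Int)) = (t.length : Int) + 2 := by
      simp; omega
    rw [h1, pvRange_two_step _ (by positivity)]
    simp only [List.map_cons, List.map_map, pvPairs]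
    congr 1
    · have hc : ((0 : Int) + 1 < (t.length : Int) + 2) := by omega
      rw [if_pos hc]
      have g1 : PySem.List.pyGetD (u :: l :: t) (0 + 1) [] = l := by
        rw [pvGetD_cons_shift u _ _ le_rfl, pvGetD_cons_zero]
      rw [pvGetD_cons_zero, g1]
    · rw [← ih]
      apply List.map_congr_left
      intro y hy
      have hy0 : 0 ≤ y := by
        have := (PySem.List.mem_pyRange_iff_of_pos (by norm_num : (0:Int) < 2) y).mp hy
        omega
      simp only [Function.comp_apply]
      have e2 : y + 2 = (y + 1) + 1 := by ring
      rw [e2, pvGetD_cons_shift u _ _ (by omega), pvGetD_cons_shift l _ _ hy0]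
      have hiff : ((y + 1) + 1 + 1 < (t.length : Int) + 2) ↔ (y + 1 < (t.length : Int)) := by omega
      by_cases hcond : y + 1 < (t.length : Int)
      · rw [if_pos (hiff.mpr hcond), if_pos hcond,
            pvGetD_cons_shift u _ _ (by omega), pvGetD_cons_shift l _ _ (by omega)]
      · rw [if_neg (fun h => hcond (hiff.mp h)), if_neg hcond]

-- matrix[0::2] reduced to its strided filterMap of indices
theorem pvSliceFM_evens (m : List (List Bool)) :
    PySem.List.slice? m (some 0) none 2
    = some (List.filterMap (fun k => m[(2*k : Nat)]?) (List.range ((m.length+1)/2))) := by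
  simp only [PySem.List.slice?, PySem.List.sliceIndices]
  norm_num
  have hc : (if 0 < m.length then (((m.length:Int) + 2 - 1) / 2).toNat else 0) = (m.length+1)/2 := by
    split_ifs with h <;> omega
  rw [hc]
  apply List.filterMap_congr
  intro k _
  congr 1

-- matrix[1::2] reduced likewise
theorem pvSliceFM_odds (m : List (List Bool)) :
    PySem.List.slice? m (some 1) none 2
    = some (List.filterMap (fun k => m[(2*k+1 : Nat)]?) (List.range (m.length/2))) := by
  simp only [PySem.List.slice?, PySem.List.sliceIndices]
  norm_num
  have hc : (if 1 < m.length then (((m.length:Int) - min 1 (m.length:Int) + 2 - 1) / 2).toNat else 0) = m.length/2 := by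
    split_ifs with h <;> omega
  rw [hc]
  apply List.filterMap_congr
  intro k hk
  have hlen : 2 ≤ m.length := by
    have := List.mem_range.mp hk; omega
  congr 1
  omega

-- ... and that filterMap is the structural recursion pvEvens
theorem pvFM_evens (m : List (List Bool)) :
    List.filterMap (fun k => m[(2*k : Nat)]?) (List.range ((m.length+1)/2)) = pvEvens m := by
  induction m using pvEvens.induct with
  | case1 => rfl
  | case2 u => simp [List.range_succ, pvEvens]
  | case3 u l t ih =>
    have hc : ((u :: l :: t).length + 1)/2 = (t.length+1)/2 + 1 := by simp; omega
    rw [hc, List.range_succ_eq_map, List.filterMap_cons, List.filterMap_map]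
    simp only [Nat.mul_zero, List.getElem?_cons_zero, pvEvens]
    congr 1

theorem pvFM_odds (m : List (List Bool)) :
    List.filterMap (fun k => m[(2*k+1 : Nat)]?) (List.range (m.length/2)) = pvOdds m := by
  induction m using pvOdds.induct with
  | case1 => rfl
  | case2 u => simp [pvOdds]
  | case3 u l t ih =>
    have hc : (u :: l :: t).length/2 = t.length/2 + 1 := by simp; omega
    rw [hc, List.range_succ_eq_map, List.filterMap_cons, List.filterMap_map]
    simp only [Nat.mul_zero, Nat.zero_add, List.getElem?_cons_succ, List.getElem?_cons_zero, pvOdds]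
    congr 1

theorem pvSlice_evens (m : List (List Bool)) :
    (PySem.List.slice? m (some 0) none 2).getD [] = pvEvens m := by
  rw [pvSliceFM_evens, Option.getD_some, pvFM_evens]

theorem pvSlice_odds (m : List (List Bool)) :
    (PySem.List.slice? m (some 1) none 2).getD [] = pvOdds m := by
  rw [pvSliceFM_odds, Option.getD_some, pvFM_odds]

-- B's zipped, padded layers are the mapped pair list
theorem pvZip_eq (m : List (List Bool)) (w : Nat) :
    ((pvEvens m).map pvTopRow).zip
      (if ((pvOdds m).map pvBotRow).length < ((pvEvens m).map pvTopRow).length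
       then ((pvOdds m).map pvBotRow) ++ [List.replicate w ' ']
       else ((pvOdds m).map pvBotRow))
    = (pvPairs m (List.replicate w false)).map (fun p => (pvTopRow p.1, pvBotRow p.2)) := by
  induction m using pvEvens.induct with
  | case1 => simp [pvEvens, pvOdds, pvPairs]
  | case2 u =>
    simp [pvEvens, pvOdds, pvPairs, pvBotRow, List.map_replicate]
  | case3 u l t ih =>
    simp only [pvEvens, pvOdds, pvPairs, List.map_cons, List.length_cons,
      Nat.add_lt_add_iff_right, List.cons_append]
    by_cases h : ((pvOdds t).map pvBotRow).length < ((pvEvens t).map pvTopRow).length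
    · rw [if_pos h] at ih ⊢
      rw [List.zip_cons_cons, ih]
    · rw [if_neg h] at ih ⊢
      rw [List.zip_cons_cons, ih]

-- merging the two glyph layers of a row pair is A's four-way per-cell branch
theorem pvOverlay_eq (u l : List Bool) : pvOverlay (pvTopRow u) (pvBotRow l) = pvRowA u l := by
  unfold pvOverlay pvTopRow pvBotRow pvRowA
  rw [PySem.List.foldl_append_eq_flatMap (fun p => [_]) (u.zip l) []]
  rw [List.nil_append, pvFlatMap_single, List.zip_map, List.map_map]
  apply congrArg
  apply List.map_congr_left
  intro p _
  obtain ⟨a, b⟩ := p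
  cases a <;> cases b <;> decide

-- ===== VERDICT (by name: the statement is the Claim_ definition above) =====
theorem render_half_block_py_spec : Claim_equal_render_half_block_py := by
  intro m _
  unfold Spec_render_half_block_py render_half_block_py render_half_block_py_alt
  cases m with
  | nil => rfl
  | cons a t =>
    dsimp only []
    have hlenA : (((a :: t).length : Int)) ≠ 0 := by
      simp only [List.length_cons]; omega
    have hneB : (a :: t) ≠ ([] : List (List Bool)) := by simp
    rw [if_pos hlenA, if_pos hneB, pvGetD_cons_zero, List.headD_cons]
    rw [PySem.List.foldl_append_eq_flatMap
      (fun y => [pvRowA (PySem.List.pyGetD (a :: t) y [])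
        (if y + 1 < (((a :: t).length : Nat) : Int) then PySem.List.pyGetD (a :: t) (y + 1) []
         else List.replicate a.length false)]) _ [], List.nil_append, pvFlatMap_single]
    rw [pvLinesA_eq (a :: t) a.length]
    rw [pvSlice_evens, pvSlice_odds, pvZip_eq (a :: t) a.length, List.map_map]
    congr 1
    apply List.map_congr_left
    intro p _
    exact (pvOverlay_eq p.1 p.2).symm
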